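-- pv_equiv track=rewrite | github.com/Kasl0/WDI | Cwiczenia 2 - zadania/4b.py | oblicz
-- ===== SOURCE A (Python) =====
-- def oblicz(n):
--     a = 1
--     count = 0
--     while a <= n:
--         b = a
--         while b <= n:
--             c = b
--             while c <= n:
--                 count += 1
--                 c *= 2
--             b *= 3
--         a *= 5
--     return count
-- ===== SOURCE B (Python) =====
-- def oblicz(n):
--     # Build the lists of powers of 5 and of 3 up to n once, then sum, for each
--     # product p5*p3 <= n, the closed-form count of doublings (n // (p5*p3)).bit_length().
--     def pows(m):
--         out = []
--         p = 1
--         while p <= n: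
--             out.append(p)
--             p *= m
--         return out
--     return sum((n // (p5 * p3)).bit_length()
--                for p5 in pows(5) for p3 in pows(3) if p5 * p3 <= n)
-- ===== Notes on version B (the rewrite author's own statement) =====
-- stated objective: faster
-- what changed: Instead of three nested while loops, B materialises the power-of-5 and power-of-3 lists once and sums, over their filtered cross product, the closed form (n // (p5*p3)).bit_length() that replaces the innermost doubling loop.
import Mathlib
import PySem

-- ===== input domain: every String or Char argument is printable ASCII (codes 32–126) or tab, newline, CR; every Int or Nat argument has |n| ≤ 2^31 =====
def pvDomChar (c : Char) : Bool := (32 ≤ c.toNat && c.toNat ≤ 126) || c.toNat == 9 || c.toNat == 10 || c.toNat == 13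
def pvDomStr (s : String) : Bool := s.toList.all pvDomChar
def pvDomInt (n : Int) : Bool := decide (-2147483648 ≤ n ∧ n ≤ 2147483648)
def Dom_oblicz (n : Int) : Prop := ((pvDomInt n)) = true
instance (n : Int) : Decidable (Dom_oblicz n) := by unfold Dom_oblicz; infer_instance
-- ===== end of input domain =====

-- B builds the power-of-5 and power-of-3 lists once and sums the closed form
-- (n // (p5*p3)).bit_length() over their filtered cross product (objective: faster).

-- ===== PORT A =====
-- while c <= n: count += 1; c *= 2   (the 0 < c guard only makes the recursion
-- total; callers always pass 0 < c, where it matches Python exactly)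
def obliczLoopC (n c count : Int) : Int :=
  if _ : 0 < c ∧ c ≤ n then obliczLoopC n (c * 2) (count + 1) else count
termination_by (n + 1 - c).toNat
decreasing_by omega

-- while b <= n: <inner c-loop>; b *= 3
def obliczLoopB (n b count : Int) : Int :=
  if _ : 0 < b ∧ b ≤ n then obliczLoopB n (b * 3) (obliczLoopC n b count) else count
termination_by (n + 1 - b).toNat
decreasing_by omega

-- while a <= n: <inner b-loop>; a *= 5
def obliczLoopA (n a count : Int) : Int :=
  if _ : 0 < a ∧ a ≤ n then obliczLoopA n (a * 5) (obliczLoopB n a count) else count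
termination_by (n + 1 - a).toNat
decreasing_by omega

def oblicz (n : Int) : Int := obliczLoopA n 1 0

-- ===== PORT B =====
-- pows(m): the list [1, m, m^2, …] of powers ≤ n (the 2 ≤ m and 0 < p guards only
-- make the recursion total; B calls it with m = 5, 3 and p = 1 only)
def pvPows (m n p : Int) : List Int :=
  if _ : 2 ≤ m ∧ 0 < p ∧ p ≤ n then p :: pvPows m n (p * m) else []
termination_by (n + 1 - p).toNat
decreasing_by rename_i h; obtain ⟨hm, hp, hpn⟩ := h; have : p < p * m := by nlinarith
              omega

-- sum((n // (p5*p3)).bit_length() for p5 in pows(5) for p3 in pows(3) if p5*p3 <= n)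
def oblicz_alt (n : Int) : Int :=
  ((pvPows 5 n 1).flatMap fun p5 =>
    ((pvPows 3 n 1).filter fun p3 => p5 * p3 ≤ n).map fun p3 =>
      (PySem.Int.bitLength (PySem.Int.floordiv n (p5 * p3)) : Int)).sum

-- ===== PRECONDITION & SPEC =====
def Spec_oblicz (n : Int) (out : Int) : Prop := out = oblicz_alt n
instance (n : Int) (out : Int) : Decidable (Spec_oblicz n out) := by unfold Spec_oblicz; infer_instance

-- ===== CLAIM (what is proved, stated in full; the proofs are below) =====
def Claim_equal_oblicz : Prop := ∀ (n : Int), Dom_oblicz n → Spec_oblicz n (oblicz n)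

-- ===== LEMMAS AND PROOFS =====

-- (n // b) // 2 = n // (b * 2) for positive b: flooring division composes.
theorem obliczFloordivMul (a b : Int) (hb : 0 < b) :
    PySem.Int.floordiv (PySem.Int.floordiv a b) 2 = PySem.Int.floordiv a (b * 2) := by
  rw [PySem.Int.floordiv_eq_ediv_of_pos hb, PySem.Int.floordiv_eq_ediv_of_pos (by omega),
    PySem.Int.floordiv_eq_ediv_of_pos (by positivity)]
  exact Int.ediv_ediv_of_nonneg hb.le

-- A's innermost loop adds exactly bit_length(n // c) to count (for 0 < c ≤ n).
theorem obliczLoopC_eq (n c count : Int) (hc : 0 < c) (hcn : c ≤ n) :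
    obliczLoopC n c count = count + (PySem.Int.bitLength (PySem.Int.floordiv n c) : Int) := by
  have hq1 : (1 : Int) ≤ PySem.Int.floordiv n c :=
    (PySem.Int.le_floordiv_iff_mul_le hc).mpr (by omega)
  rw [obliczLoopC, dif_pos ⟨hc, hcn⟩]
  by_cases h2 : c * 2 ≤ n
  · rw [obliczLoopC_eq n (c * 2) (count + 1) (by omega) h2,
      PySem.Int.bitLength_of_pos (n := PySem.Int.floordiv n c) (by omega),
      obliczFloordivMul n c hc]
    push_cast; ring
  · rw [obliczLoopC, dif_neg (by omega)]
    have hq2 : PySem.Int.floordiv n c < 2 :=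
      (PySem.Int.floordiv_lt_iff_lt_mul hc).mpr (by omega)
    have he : PySem.Int.floordiv n c = 1 := by omega
    have hb1 : PySem.Int.bitLength 1 = 1 := by decide
    rw [he, hb1]; omega
termination_by (n + 1 - c).toNat
decreasing_by omega

-- every element of pvPows m n p is at least p
theorem pvPows_mem_ge (m n p q : Int) (hq : q ∈ pvPows m n p) : p ≤ q := by
  rw [pvPows] at hq
  split at hq
  case isTrue h =>
    rcases List.mem_cons.mp hq with h1 | h1
    · omega
    · have hrec := pvPows_mem_ge m n (p * m) q h1
      nlinarith [h.1, h.2.1]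
  case isFalse h => simp at hq
termination_by (n + 1 - p).toNat
decreasing_by rename_i hcond; obtain ⟨hm, hp, hpn⟩ := hcond
              have : p < p * m := by nlinarith
              omega

-- A's middle loop, started at b*p, equals B's filtered sum over powers of 3 from p
theorem obliczLoopB_eq (n b p count : Int) (hb : 0 < b) (hp : 0 < p) :
    obliczLoopB n (b * p) count =
      count + (((pvPows 3 n p).filter fun p3 => b * p3 ≤ n).map fun p3 =>
        (PySem.Int.bitLength (PySem.Int.floordiv n (b * p3)) : Int)).sum := by
  by_cases hpn : p ≤ n
  · rw [pvPows, dif_pos ⟨by norm_num, hp, hpn⟩]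
    by_cases hbp : b * p ≤ n
    · have hbp0 : 0 < b * p := by positivity
      rw [obliczLoopB, dif_pos ⟨hbp0, hbp⟩, obliczLoopC_eq n (b * p) count hbp0 hbp]
      have h3 : b * p * 3 = b * (p * 3) := by ring
      rw [h3, obliczLoopB_eq n b (p * 3) _ hb (by omega)]
      rw [List.filter_cons, if_pos (by simpa using hbp), List.map_cons, List.sum_cons]
      omega
    · rw [obliczLoopB, dif_neg (by rintro ⟨_, h2⟩; exact hbp h2)]
      rw [List.filter_cons, if_neg (by simpa using hbp)]
      have hnil : ((pvPows 3 n (p * 3)).filter fun p3 => decide (b * p3 ≤ n)) = [] := by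
        rw [List.filter_eq_nil_iff]
        intro q hq
        have hpq : p * 3 ≤ q := pvPows_mem_ge 3 n (p * 3) q hq
        have hbq : b * p ≤ b * q := by nlinarith
        simp; omega
      rw [hnil]; simp
  · rw [pvPows, dif_neg (by rintro ⟨_, _, h2⟩; omega)]
    rw [obliczLoopB, dif_neg (by
      rintro ⟨h1, h2⟩
      have : p ≤ b * p := le_mul_of_one_le_left hp.le hb
      omega)]
    simp
termination_by (n + 1 - p).toNat
decreasing_by omega

-- A's outer loop equals B's flat-mapped sum over powers of 5 from a
theorem obliczLoopA_eq (n a count : Int) (ha : 0 < a) :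
    obliczLoopA n a count =
      count + ((pvPows 5 n a).flatMap fun p5 =>
        ((pvPows 3 n 1).filter fun p3 => p5 * p3 ≤ n).map fun p3 =>
          (PySem.Int.bitLength (PySem.Int.floordiv n (p5 * p3)) : Int)).sum := by
  by_cases han : a ≤ n
  · rw [show pvPows 5 n a = a :: pvPows 5 n (a * 5) from by
        rw [pvPows, dif_pos ⟨by norm_num, ha, han⟩]]
    rw [obliczLoopA, dif_pos ⟨ha, han⟩]
    have hB := obliczLoopB_eq n a 1 count ha one_pos
    rw [mul_one] at hB
    rw [hB, obliczLoopA_eq n (a * 5) _ (by omega)]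
    simp only [List.flatMap_cons, List.sum_append]
    omega
  · rw [show pvPows 5 n a = ([] : List Int) from by
        rw [pvPows, dif_neg (by rintro ⟨_, _, h2⟩; omega)]]
    rw [obliczLoopA, dif_neg (by rintro ⟨_, h2⟩; omega)]
    simp
termination_by (n + 1 - a).toNat
decreasing_by omega

-- ===== VERDICT (by name: the statement is the Claim_ definition above) =====
theorem oblicz_spec : Claim_equal_oblicz := by
  intro n _
  unfold Spec_oblicz oblicz oblicz_alt
  rw [obliczLoopA_eq n 1 0 (by omega)]
  omega
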